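-- pv_equiv track=rewrite | github.com/SETT-Centre-Data-and-AI/Pteredactyl | src/pteredactyl_webapp/app.py | visualize_entities
-- ===== SOURCE A (Python) =====
-- def visualize_entities(redacted_text: str):
--     colors = {
--         "PERSON": "linear-gradient(90deg, #aa9cfc, #fc9ce7)",
--         "ID": "linear-gradient(90deg, #ff9a9e, #fecfef)",
--         "GPE": "linear-gradient(90deg, #fccb90, #d57eeb)",
--         "NHS_NUMBER": "linear-gradient(90deg, #ff9a9e, #fecfef)",
--         "DATE_TIME": "linear-gradient(90deg, #fddb92, #d1fdff)",
--         "LOCATION": "linear-gradient(90deg, #a1c4fd, #c2e9fb)",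
--         "EVENT": "linear-gradient(90deg, #a6c0fe, #f68084)",
--         "POSTCODE": "linear-gradient(90deg, #c2e59c, #64b3f4)",
--         "USERNAME": "linear-gradient(90deg, #aa9cfc, #fc9ce7)",
--         "FALSE_NEGATIVE": "linear-gradient(90deg, #ff6b6b, #ff9a9e)",  # Red for false negatives
--         "/FALSE_NEGATIVE": "linear-gradient(90deg, #ff6b6b, #ff9a9e)",  # Red for false negatives
--         "FALSE_POSITIVE": "linear-gradient(90deg, #ffcccb, #ff6666)",  # Light red for false positives
--         "/FALSE_POSITIVE": "linear-gradient(90deg, #ffcccb, #ff6666)",  # Light red for false positives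
--     }
--
--     token_colors = {
--         "[PERSON]": "PERSON",
--         "[LOCATION]": "LOCATION",
--         "[ID]": "ID",
--         "[NHS_NUMBER]": "NHS_NUMBER",
--         "[DATE_TIME]": "DATE_TIME",
--         "[EVENT]": "EVENT",
--         "[POSTCODE]": "POSTCODE",
--         "[USERNAME]": "USERNAME",
--         "[FALSE_NEGATIVE]": "FALSE_NEGATIVE",
--         "[/FALSE_NEGATIVE]": "/FALSE_NEGATIVE",
--         "[FALSE_POSITIVE]": "FALSE_POSITIVE",
--         "[/FALSE_POSITIVE]": "/FALSE_POSITIVE",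
--     }
--
--     def wrap_token_in_html(text, token, color):
--         parts = text.split(token)
--         wrapped_token = f'<span style="background: {color}; padding: 2px; border-radius: 3px;">{token}</span>'
--         return wrapped_token.join(parts)
--
--     for token, color_class in token_colors.items():
--         redacted_text = wrap_token_in_html(redacted_text, token, colors[color_class])
--
--     return f'<div style="white-space: pre-wrap; border: 1px solid #ccc; padding: 10px; border-radius: 5px;">{redacted_text}</div>'
-- ===== SOURCE B (Python) =====
-- def visualize_entities(redacted_text: str):
--     # token -> gradient, one flat table (reverse order of the original passes; order is
--     # irrelevant because no token is a prefix of another)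
--     gradients = {
--         "[/FALSE_POSITIVE]": "linear-gradient(90deg, #ffcccb, #ff6666)",
--         "[FALSE_POSITIVE]": "linear-gradient(90deg, #ffcccb, #ff6666)",
--         "[/FALSE_NEGATIVE]": "linear-gradient(90deg, #ff6b6b, #ff9a9e)",
--         "[FALSE_NEGATIVE]": "linear-gradient(90deg, #ff6b6b, #ff9a9e)",
--         "[USERNAME]": "linear-gradient(90deg, #aa9cfc, #fc9ce7)",
--         "[POSTCODE]": "linear-gradient(90deg, #c2e59c, #64b3f4)",
--         "[EVENT]": "linear-gradient(90deg, #a6c0fe, #f68084)",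
--         "[DATE_TIME]": "linear-gradient(90deg, #fddb92, #d1fdff)",
--         "[NHS_NUMBER]": "linear-gradient(90deg, #ff9a9e, #fecfef)",
--         "[ID]": "linear-gradient(90deg, #ff9a9e, #fecfef)",
--         "[LOCATION]": "linear-gradient(90deg, #a1c4fd, #c2e9fb)",
--         "[PERSON]": "linear-gradient(90deg, #aa9cfc, #fc9ce7)",
--     }
--     spans = {
--         t: f'<span style="background: {g}; padding: 2px; border-radius: 3px;">{t}</span>'
--         for t, g in gradients.items()
--     }
--     out = []
--     i, n = 0, len(redacted_text)
--     while i < n: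
--         c = redacted_text[i]
--         if c == "[":
--             for t, s in spans.items():
--                 if redacted_text.startswith(t, i):
--                     out.append(s)
--                     i += len(t)
--                     break
--             else:
--                 out.append(c)
--                 i += 1
--         else:
--             out.append(c)
--             i += 1
--     return (
--         '<div style="white-space: pre-wrap; border: 1px solid #ccc; padding: 10px; border-radius: 5px;">'
--         + "".join(out)
--         + "</div>"
--     )
-- ===== Notes on version B (the rewrite author's own statement) =====
-- stated objective: alternative
-- what changed: A rewrites the whole text twelve times, one split/join pass per token; B builds one token-to-span table and makes a single left-to-right scan that matches a table token at each opening bracket, emits its span and skips it, then wraps the result in the same outer div.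
import Mathlib
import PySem

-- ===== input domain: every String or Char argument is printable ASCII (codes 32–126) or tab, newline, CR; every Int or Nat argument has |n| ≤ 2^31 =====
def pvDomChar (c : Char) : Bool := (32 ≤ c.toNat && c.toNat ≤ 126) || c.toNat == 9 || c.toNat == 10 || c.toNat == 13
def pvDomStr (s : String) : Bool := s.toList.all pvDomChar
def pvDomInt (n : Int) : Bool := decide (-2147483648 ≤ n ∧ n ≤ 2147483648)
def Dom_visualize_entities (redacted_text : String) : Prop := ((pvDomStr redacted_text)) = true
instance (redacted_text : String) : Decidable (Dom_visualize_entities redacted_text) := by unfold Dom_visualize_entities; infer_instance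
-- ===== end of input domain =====

-- B replaces A's twelve sequential split/join passes by ONE left-to-right scan that matches a
-- token table at each '[' (alternative decomposition; return value only, nothing is mutated).

-- ===== PORT A =====

def pvColors : PySem.Dict (List Char) (List Char) := ⟨[
  ("PERSON".toList, "linear-gradient(90deg, #aa9cfc, #fc9ce7)".toList),
  ("ID".toList, "linear-gradient(90deg, #ff9a9e, #fecfef)".toList),
  ("GPE".toList, "linear-gradient(90deg, #fccb90, #d57eeb)".toList),
  ("NHS_NUMBER".toList, "linear-gradient(90deg, #ff9a9e, #fecfef)".toList),
  ("DATE_TIME".toList, "linear-gradient(90deg, #fddb92, #d1fdff)".toList),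
  ("LOCATION".toList, "linear-gradient(90deg, #a1c4fd, #c2e9fb)".toList),
  ("EVENT".toList, "linear-gradient(90deg, #a6c0fe, #f68084)".toList),
  ("POSTCODE".toList, "linear-gradient(90deg, #c2e59c, #64b3f4)".toList),
  ("USERNAME".toList, "linear-gradient(90deg, #aa9cfc, #fc9ce7)".toList),
  ("FALSE_NEGATIVE".toList, "linear-gradient(90deg, #ff6b6b, #ff9a9e)".toList),
  ("/FALSE_NEGATIVE".toList, "linear-gradient(90deg, #ff6b6b, #ff9a9e)".toList),
  ("FALSE_POSITIVE".toList, "linear-gradient(90deg, #ffcccb, #ff6666)".toList),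
  ("/FALSE_POSITIVE".toList, "linear-gradient(90deg, #ffcccb, #ff6666)".toList)]⟩

def pvTokenColors : List (List Char × List Char) := [
  ("[PERSON]".toList, "PERSON".toList),
  ("[LOCATION]".toList, "LOCATION".toList),
  ("[ID]".toList, "ID".toList),
  ("[NHS_NUMBER]".toList, "NHS_NUMBER".toList),
  ("[DATE_TIME]".toList, "DATE_TIME".toList),
  ("[EVENT]".toList, "EVENT".toList),
  ("[POSTCODE]".toList, "POSTCODE".toList),
  ("[USERNAME]".toList, "USERNAME".toList),
  ("[FALSE_NEGATIVE]".toList, "FALSE_NEGATIVE".toList),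
  ("[/FALSE_NEGATIVE]".toList, "/FALSE_NEGATIVE".toList),
  ("[FALSE_POSITIVE]".toList, "FALSE_POSITIVE".toList),
  ("[/FALSE_POSITIVE]".toList, "/FALSE_POSITIVE".toList)]

def pvGradients : List (List Char × List Char) := [
  ("[/FALSE_POSITIVE]".toList, "linear-gradient(90deg, #ffcccb, #ff6666)".toList),
  ("[FALSE_POSITIVE]".toList, "linear-gradient(90deg, #ffcccb, #ff6666)".toList),
  ("[/FALSE_NEGATIVE]".toList, "linear-gradient(90deg, #ff6b6b, #ff9a9e)".toList),
  ("[FALSE_NEGATIVE]".toList, "linear-gradient(90deg, #ff6b6b, #ff9a9e)".toList),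
  ("[USERNAME]".toList, "linear-gradient(90deg, #aa9cfc, #fc9ce7)".toList),
  ("[POSTCODE]".toList, "linear-gradient(90deg, #c2e59c, #64b3f4)".toList),
  ("[EVENT]".toList, "linear-gradient(90deg, #a6c0fe, #f68084)".toList),
  ("[DATE_TIME]".toList, "linear-gradient(90deg, #fddb92, #d1fdff)".toList),
  ("[NHS_NUMBER]".toList, "linear-gradient(90deg, #ff9a9e, #fecfef)".toList),
  ("[ID]".toList, "linear-gradient(90deg, #ff9a9e, #fecfef)".toList),
  ("[LOCATION]".toList, "linear-gradient(90deg, #a1c4fd, #c2e9fb)".toList),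
  ("[PERSON]".toList, "linear-gradient(90deg, #aa9cfc, #fc9ce7)".toList)]

-- wrap_token_in_html: text.split(token) joined by the span f-string
def pvWrapTokenInHtml (text token color : List Char) : List Char :=
  let parts := PySem.Chars.splitOn text token
  let wrapped := "<span style=\"background: ".toList ++ color ++ "; padding: 2px; border-radius: 3px;\">".toList
      ++ token ++ "</span>".toList
  PySem.Chars.join wrapped parts

-- for token, color_class in token_colors.items(): … colors[color_class]
-- (every color_class key is present in colors, so getD's [] default is never used)
def visualize_entities (redacted_text : String) : String :=
  let body := pvTokenColors.foldl
    (fun acc p => pvWrapTokenInHtml acc p.1 (PySem.Dict.getD pvColors p.2 [])) redacted_text.toList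
  String.ofList ("<div style=\"white-space: pre-wrap; border: 1px solid #ccc; padding: 10px; border-radius: 5px;\">".toList
    ++ body ++ "</div>".toList)

-- ===== PORT B =====
-- the span f-string of Source B's dict comprehension
def pvSpanB (t g : List Char) : List Char :=
  "<span style=\"background: ".toList ++ g ++ "; padding: 2px; border-radius: 3px;\">".toList
    ++ t ++ "</span>".toList

def pvSpans : List (List Char × List Char) := pvGradients.map (fun p => (p.1, pvSpanB p.1 p.2))

-- the while loop: at '[', the first table token that startswith-matches is emitted as its span
-- and skipped (i += len(t); every table token is nonempty, so the skip is drop (len-1) of the tail)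
def pvScan (table : List (List Char × List Char)) : List Char → List Char
  | [] => []
  | c :: z =>
    if c = '[' then
      match table.find? (fun p => PySem.Chars.startswith (c :: z) p.1) with
      | some (t, sp) => sp ++ pvScan table (z.drop (t.length - 1))
      | none => c :: pvScan table z
    else c :: pvScan table z
termination_by s => s.length
decreasing_by all_goals (simp; try omega)

def visualize_entities_alt (redacted_text : String) : String :=
  String.ofList ("<div style=\"white-space: pre-wrap; border: 1px solid #ccc; padding: 10px; border-radius: 5px;\">".toList
    ++ pvScan pvSpans redacted_text.toList ++ "</div>".toList)

-- ===== PRECONDITION & SPEC =====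
def Spec_visualize_entities (redacted_text : String) (out : String) : Prop := out = visualize_entities_alt redacted_text
instance (redacted_text : String) (out : String) : Decidable (Spec_visualize_entities redacted_text out) := by unfold Spec_visualize_entities; infer_instance

-- ===== CLAIM (what is proved, stated in full; the proofs are below) =====
def Claim_equal_visualize_entities : Prop := ∀ (redacted_text : String), Dom_visualize_entities redacted_text → Spec_visualize_entities redacted_text (visualize_entities redacted_text)

-- ===== LEMMAS AND PROOFS =====

-- pvRep t sp s : s with every (leftmost-first) occurrence of t replaced by sp — the value of one
-- split/join pass of A (proved as pvWrap_eq below)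
def pvRep (t sp : List Char) : List Char → List Char
  | [] => []
  | c :: z =>
    if t.isPrefixOf (c :: z) ∧ t ≠ [] then sp ++ pvRep t sp (z.drop (t.length - 1))
    else c :: pvRep t sp z
termination_by s => s.length
decreasing_by all_goals (simp; try omega)

-- structural form of PySem.Chars.splitOn
def pvSplit (t : List Char) : List Char → List (List Char)
  | [] => [[]]
  | c :: z =>
    if t.isPrefixOf (c :: z) ∧ t ≠ [] then [] :: pvSplit t (z.drop (t.length - 1))
    else (pvSplit t z).modifyHead (c :: ·)
termination_by s => s.length
decreasing_by all_goals (simp; try omega)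

-- token shape: starts with '[', no further '[' and no '<'
def pvTokShape (u : List Char) : Bool :=
  (u.head? == some '[') && !(u.drop 1).contains '[' && !(u.drop 1).contains '<'

-- a may not match starting anywhere strictly inside b (even extended by an arbitrary suffix)
def pvOkB (a b : List Char) : Bool :=
  (List.range b.length).all (fun k => !(a.isPrefixOf (b.drop k)) && !((b.drop k).isPrefixOf a))

-- what pvMain needs of every (token, span) already in the scan table, w.r.t. the new token u
def pvCompat (u : List Char) (L : List (List Char × List Char)) : Bool :=
  L.all (fun p => pvOkB p.1 u && pvOkB u p.2 && (p.2.head? == some '<') && pvTokShape p.1)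
-- ---------- basic rewrite lemmas ----------

lemma pvScan_nil (L : List (List Char × List Char)) : pvScan L [] = [] := by
  simp [pvScan]

lemma pvScan_cons_not (L : List (List Char × List Char)) (c : Char) (z : List Char) (hc : ¬ c = '[') :
    pvScan L (c :: z) = c :: pvScan L z := by
  rw [pvScan]; simp [hc]

lemma pvScan_cons_none (L : List (List Char × List Char)) (z : List Char)
    (h : L.find? (fun p => PySem.Chars.startswith ('[' :: z) p.1) = none) :
    pvScan L ('[' :: z) = '[' :: pvScan L z := by
  rw [pvScan]; simp [h]

lemma pvScan_cons_some (L : List (List Char × List Char)) (z t sp : List Char)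
    (h : L.find? (fun p => PySem.Chars.startswith ('[' :: z) p.1) = some (t, sp)) :
    pvScan L ('[' :: z) = sp ++ pvScan L (z.drop (t.length - 1)) := by
  rw [pvScan]; simp [h]

lemma pvScan_table_nil : ∀ s : List Char, pvScan [] s = s := by
  intro s
  induction s with
  | nil => simp [pvScan]
  | cons c z ih =>
    by_cases hc : c = '['
    · subst hc
      rw [pvScan_cons_none [] z (by simp), ih]
    · rw [pvScan_cons_not [] c z hc, ih]

lemma pvRep_nil (t sp : List Char) : pvRep t sp [] = [] := by simp [pvRep]

lemma pvRep_cons_not (t sp : List Char) (c : Char) (z : List Char) (h : ¬ t <+: (c :: z)) :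
    pvRep t sp (c :: z) = c :: pvRep t sp z := by
  rw [pvRep, if_neg]
  intro hcond
  exact h (List.isPrefixOf_iff_prefix.mp hcond.1)

lemma pvRep_head (t sp y : List Char) (ht : t ≠ []) :
    pvRep t sp (t ++ y) = sp ++ pvRep t sp y := by
  obtain ⟨c, t', rfl⟩ : ∃ c t', t = c :: t' := by
    cases t with
    | nil => exact absurd rfl ht
    | cons c t' => exact ⟨c, t', rfl⟩
  rw [List.cons_append, pvRep, if_pos ⟨List.isPrefixOf_iff_prefix.mpr ⟨y, by simp⟩, by simp⟩]
  have hdrop : (t' ++ y).drop ((c :: t').length - 1) = y := by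
    simp
  rw [hdrop]

-- a cannot match at any position k < b.length of b ++ y
lemma pvNoCross (a b : List Char) (h : pvOkB a b = true) :
    ∀ (y : List Char) (k : Nat), k < b.length → ¬ a <+: (b ++ y).drop k := by
  intro y k hk hpre
  have hd : (b ++ y).drop k = b.drop k ++ y := List.drop_append_of_le_length (by omega)
  rw [hd] at hpre
  have h2 := (List.all_eq_true.mp h) k (List.mem_range.mpr hk)
  simp only [Bool.and_eq_true, Bool.not_eq_true'] at h2
  rcases List.prefix_or_prefix_of_prefix hpre (List.prefix_append _ _) with h3 | h3
  · rw [← List.isPrefixOf_iff_prefix] at h3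
    rw [h2.1] at h3
    exact absurd h3 (by simp)
  · rw [← List.isPrefixOf_iff_prefix] at h3
    rw [h2.2] at h3
    exact absurd h3 (by simp)

lemma pvRep_through (t sp x y : List Char)
    (h : ∀ k, k < x.length → ¬ t <+: (x ++ y).drop k) :
    pvRep t sp (x ++ y) = x ++ pvRep t sp y := by
  induction x with
  | nil => simp
  | cons c x' ih =>
    rw [List.cons_append, pvRep_cons_not t sp c (x' ++ y) (by
      have := h 0 (by simp)
      simpa using this)]
    rw [ih (fun k hk => by
      have := h (k + 1) (by simp; omega)
      simpa using this)]
    simp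

lemma pvScan_through (L : List (List Char × List Char)) (x y : List Char)
    (h : ∀ p ∈ L, ∀ k, k < x.length → ¬ p.1 <+: (x ++ y).drop k) :
    pvScan L (x ++ y) = x ++ pvScan L y := by
  induction x with
  | nil => simp
  | cons c x' ih =>
    have hnone : L.find? (fun p => PySem.Chars.startswith (c :: (x' ++ y)) p.1) = none := by
      rw [List.find?_eq_none]
      intro p hp
      have h0 := h p hp 0 (by simp)
      simp only [List.drop_zero, List.cons_append] at h0
      simp [PySem.Chars.startswith, List.isPrefixOf_iff_prefix]
      exact h0
    have step : pvScan L (c :: (x' ++ y)) = c :: pvScan L (x' ++ y) := by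
      by_cases hc : c = '['
      · subst hc; exact pvScan_cons_none L (x' ++ y) hnone
      · exact pvScan_cons_not L c (x' ++ y) hc
    rw [List.cons_append, step, ih (fun p hp k hk => by
      have := h p hp (k + 1) (by simp; omega)
      simpa using this)]
    simp

-- a word of token-interior characters is a prefix of a scan's output only if it prefixes the input
lemma pvNoIntro (L : List (List Char × List Char))
    (hsp : ∀ p ∈ L, p.2.head? = some '<') :
    ∀ (n : Nat) (z u' : List Char), z.length ≤ n → u'.contains '[' = false → u'.contains '<' = false →
      u' <+: pvScan L z → u' <+: z := by
  intro n
  induction n with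
  | zero =>
    intro z u' hn _ _ hpre
    have hz : z = [] := by cases z <;> simp_all
    subst hz
    rw [pvScan_nil] at hpre
    simpa using hpre
  | succ n ih =>
    intro z u' hn h1 h2 hpre
    cases z with
    | nil =>
      rw [pvScan_nil] at hpre
      simpa using hpre
    | cons c z' =>
      cases u' with
      | nil => exact List.nil_prefix
      | cons a w =>
        have ha : ¬ a = '[' := by
          intro hEq; subst hEq; simp at h1
        have ha2 : ¬ a = '<' := by
          intro hEq; subst hEq; simp at h2
        have hw1 : w.contains '[' = false := by
          simp only [List.contains_cons, Bool.or_eq_false_iff] at h1; exact h1.2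
        have hw2 : w.contains '<' = false := by
          simp only [List.contains_cons, Bool.or_eq_false_iff] at h2; exact h2.2
        by_cases hc : c = '['
        · subst hc
          cases hfind : L.find? (fun p => PySem.Chars.startswith ('[' :: z') p.1) with
          | none =>
            rw [pvScan_cons_none L z' hfind] at hpre
            exact absurd ((List.cons_prefix_cons).mp hpre).1 ha
          | some pr =>
            obtain ⟨t, sp⟩ := pr
            rw [pvScan_cons_some L z' t sp hfind] at hpre
            have hhead : sp.head? = some '<' := hsp (t, sp) (List.mem_of_find?_eq_some hfind)
            obtain ⟨sp', rfl⟩ : ∃ sp', sp = '<' :: sp' := by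
              cases sp with
              | nil => simp at hhead
              | cons h0 tl =>
                simp only [List.head?_cons, Option.some.injEq] at hhead
                exact ⟨tl, by rw [hhead]⟩
            rw [List.cons_append] at hpre
            exact absurd ((List.cons_prefix_cons).mp hpre).1 ha2
        · rw [pvScan_cons_not L c z' hc] at hpre
          rcases (List.cons_prefix_cons).mp hpre with ⟨hEq, hrest⟩
          subst hEq
          exact (List.cons_prefix_cons).mpr
            ⟨rfl, ih z' w (by simp at hn; omega) hw1 hw2 hrest⟩

-- ---------- the main lemma: one pvRep pass over a scan = the scan with the token prepended ----------

lemma pvMainAux (u su : List Char) (L : List (List Char × List Char))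
    (hu : pvTokShape u = true) (hL : pvCompat u L = true) :
    ∀ (n : Nat) (s : List Char), s.length ≤ n →
      pvRep u su (pvScan L s) = pvScan ((u, su) :: L) s := by
  obtain ⟨ut, rfl, hut1, hut2⟩ : ∃ ut, u = '[' :: ut ∧ ut.contains '[' = false ∧ ut.contains '<' = false := by
    cases u with
    | nil => simp [pvTokShape] at hu
    | cons c ut =>
      simp [pvTokShape] at hu
      exact ⟨ut, by rw [hu.1.1], by simpa using hu.1.2, by simpa using hu.2⟩
  have hLparts : ∀ p ∈ L, pvOkB p.1 ('[' :: ut) = true ∧ pvOkB ('[' :: ut) p.2 = true ∧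
      p.2.head? = some '<' ∧ pvTokShape p.1 = true := by
    intro p hp
    have hps := (List.all_eq_true.mp hL) p hp
    simp only [Bool.and_eq_true, beq_iff_eq] at hps
    exact ⟨hps.1.1.1, hps.1.1.2, hps.1.2, hps.2⟩
  have hsp : ∀ p ∈ L, p.2.head? = some '<' := fun p hp => (hLparts p hp).2.2.1
  intro n
  induction n with
  | zero =>
    intro s hn
    have hs : s = [] := by cases s <;> simp_all
    subst hs
    simp [pvScan_nil, pvRep_nil]
  | succ n ih =>
    intro s hn
    cases s with
    | nil => simp [pvScan_nil, pvRep_nil]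
    | cons c z =>
      by_cases hc : c = '['
      · subst hc
        cases hfind : ((('[' :: ut), su) :: L).find? (fun p => PySem.Chars.startswith ('[' :: z) p.1) with
        | none =>
          have hall := List.find?_eq_none.mp hfind
          have hnu : ¬ ('[' :: ut) <+: ('[' :: z) := by
            have := hall (('[' :: ut), su) List.mem_cons_self
            simpa [PySem.Chars.startswith, List.isPrefixOf_iff_prefix] using this
          have hfL : L.find? (fun p => PySem.Chars.startswith ('[' :: z) p.1) = none :=
            List.find?_eq_none.mpr (fun p hp => hall p (List.mem_cons_of_mem _ hp))
          rw [pvScan_cons_none L z hfL, pvScan_cons_none _ z hfind]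
          rw [pvRep_cons_not _ su '[' (pvScan L z) (by
            intro hpre
            rcases (List.cons_prefix_cons).mp hpre with ⟨_, hrest⟩
            have := pvNoIntro L hsp z.length z ut le_rfl hut1 hut2 hrest
            exact hnu ((List.cons_prefix_cons).mpr ⟨rfl, this⟩))]
          rw [ih z (by simp at hn; omega)]
        | some pr =>
          obtain ⟨t, sp⟩ := pr
          rw [pvScan_cons_some _ z t sp hfind]
          rcases List.find?_cons_eq_some.mp hfind with ⟨hmatch, hEq⟩ | ⟨hnomatch, hfindL⟩
          · -- the new token u matches at the head
            injection hEq with hEq1 hEq2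
            subst hEq1; subst hEq2
            have hpre : ('[' :: ut) <+: ('[' :: z) := by
              simpa [PySem.Chars.startswith, List.isPrefixOf_iff_prefix] using hmatch
            obtain ⟨rest, hrest⟩ := hpre
            have hz : z = ut ++ rest := by
              rw [List.cons_append] at hrest
              injection hrest with _ h2
              exact h2.symm
            have hdrop : z.drop (('[' :: ut).length - 1) = rest := by
              rw [hz]; simp
            have hscanL : pvScan L ('[' :: z) = ('[' :: ut) ++ pvScan L rest := by
              rw [show ('[' : Char) :: z = ('[' :: ut) ++ rest from by rw [List.cons_append, hz]]
              exact pvScan_through L ('[' :: ut) rest (fun p hp k hk =>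
                pvNoCross p.1 ('[' :: ut) (hLparts p hp).1 rest k hk)
            rw [hscanL, pvRep_head ('[' :: ut) su (pvScan L rest) (by simp), hdrop]
            have hlen : rest.length ≤ n := by
              have hzl : z.length = ut.length + rest.length := by rw [hz]; simp
              simp at hn; omega
            rw [ih rest hlen]
          · -- a token already in the table matches at the head
            have hmem := List.mem_of_find?_eq_some hfindL
            have hparts := hLparts (t, sp) hmem
            obtain ⟨tt, rfl⟩ : ∃ tt, t = '[' :: tt := by
              have htsh := hparts.2.2.2
              cases t with
              | nil => simp [pvTokShape] at htsh
              | cons c0 tt =>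
                simp [pvTokShape] at htsh
                exact ⟨tt, by rw [htsh.1.1]⟩
            have hpre : ('[' :: tt) <+: ('[' :: z) := by
              have hmatch2 := List.find?_some hfindL
              simpa [PySem.Chars.startswith, List.isPrefixOf_iff_prefix] using hmatch2
            obtain ⟨rest, hrest⟩ := hpre
            have hz : z = tt ++ rest := by
              rw [List.cons_append] at hrest
              injection hrest with _ h2
              exact h2.symm
            have hdrop : z.drop (('[' :: tt).length - 1) = rest := by
              rw [hz]; simp
            rw [pvScan_cons_some L z ('[' :: tt) sp hfindL, hdrop]
            rw [pvRep_through ('[' :: ut) su sp (pvScan L rest) (fun k hk =>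
              pvNoCross ('[' :: ut) sp hparts.2.1 (pvScan L rest) k hk)]
            have hlen : rest.length ≤ n := by
              have hzl : z.length = tt.length + rest.length := by rw [hz]; simp
              simp at hn; omega
            rw [ih rest hlen]
      · rw [pvScan_cons_not L c z hc, pvScan_cons_not _ c z hc]
        rw [pvRep_cons_not _ su c (pvScan L z) (by
          intro hpre
          exact hc ((List.cons_prefix_cons).mp hpre).1.symm)]
        rw [ih z (by simp at hn; omega)]

lemma pvMain (u su : List Char) (L : List (List Char × List Char))
    (hu : pvTokShape u = true) (hL : pvCompat u L = true) (s : List Char) :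
    pvRep u su (pvScan L s) = pvScan ((u, su) :: L) s :=
  pvMainAux u su L hu hL s.length s le_rfl

-- ---------- split/join of A equals pvRep ----------

lemma pvSplitOn_go_spec (t : List Char) (ht : t ≠ []) :
    ∀ (fuel : Nat) (s cur : List Char) (acc : List (List Char)), s.length < fuel →
      PySem.Chars.splitOn.go t fuel s cur acc
        = acc.reverse ++ (pvSplit t s).modifyHead (cur.reverse ++ ·) := by
  intro fuel
  induction fuel with
  | zero => intro s cur acc h; omega
  | succ fuel ih =>
    intro s cur acc h
    cases s with
    | nil =>
      rw [PySem.Chars.splitOn.go] <;> simp [pvSplit]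
    | cons c z =>
      by_cases hp : t.isPrefixOf (c :: z)
      · have h1 : 1 ≤ t.length := by cases t <;> simp_all
        have hstep : PySem.Chars.splitOn.go t (fuel + 1) (c :: z) cur acc
            = PySem.Chars.splitOn.go t fuel ((c :: z).drop t.length) [] (cur.reverse :: acc) := by
          rw [PySem.Chars.splitOn.go]
          simp [hp]
        rw [hstep, ih ((c :: z).drop t.length) [] (cur.reverse :: acc) (by simp at h ⊢; omega)]
        have hdrop : (c :: z).drop t.length = z.drop (t.length - 1) := by
          cases t with
          | nil => simp_all
          | cons a b => simp
        rw [hdrop, pvSplit, if_pos ⟨hp, ht⟩]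
        cases pvSplit t (z.drop (t.length - 1)) <;> simp [List.modifyHead]
      · have hstep : PySem.Chars.splitOn.go t (fuel + 1) (c :: z) cur acc
            = PySem.Chars.splitOn.go t fuel z (c :: cur) acc := by
          rw [PySem.Chars.splitOn.go]
          simp [hp]
        rw [hstep, ih z (c :: cur) acc (by simp at h ⊢; omega)]
        rw [pvSplit, if_neg (by simp [hp])]
        cases pvSplit t z <;> simp [List.modifyHead]

lemma pvSplitOn_eq (t s : List Char) (ht : t ≠ []) :
    PySem.Chars.splitOn s t = pvSplit t s := by
  rw [PySem.Chars.splitOn, pvSplitOn_go_spec t ht (s.length + 1) s [] [] (by omega)]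
  cases pvSplit t s <;> simp [List.modifyHead]

lemma pvSplit_ne_nil (t : List Char) : ∀ (n : Nat) (s : List Char), s.length ≤ n → pvSplit t s ≠ [] := by
  intro n
  induction n with
  | zero =>
    intro s hn
    have hs : s = [] := by cases s <;> simp_all
    subst hs
    simp [pvSplit]
  | succ n ih =>
    intro s hn
    cases s with
    | nil => simp [pvSplit]
    | cons c z =>
      rw [pvSplit]
      split
      · simp
      · have := ih z (by simp at hn; omega)
        cases hsp : pvSplit t z with
        | nil => exact absurd hsp this
        | cons a X => simp [List.modifyHead]

lemma pvJoin_split (t sp : List Char) (ht : t ≠ []) :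
    ∀ (n : Nat) (s : List Char), s.length ≤ n →
      PySem.Chars.join sp (pvSplit t s) = pvRep t sp s := by
  intro n
  induction n with
  | zero =>
    intro s hn
    have hs : s = [] := by cases s <;> simp_all
    subst hs
    rw [show pvSplit t [] = [[]] from by simp [pvSplit], PySem.Chars.join_singleton, pvRep_nil]
  | succ n ih =>
    intro s hn
    cases s with
    | nil => rw [show pvSplit t [] = [[]] from by simp [pvSplit], PySem.Chars.join_singleton, pvRep_nil]
    | cons c z =>
      by_cases hp : t.isPrefixOf (c :: z)
      · rw [pvSplit, if_pos ⟨hp, ht⟩, pvRep, if_pos ⟨hp, ht⟩]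
        obtain ⟨a, X, hax⟩ : ∃ a X, pvSplit t (z.drop (t.length - 1)) = a :: X := by
          cases hsp : pvSplit t (z.drop (t.length - 1)) with
          | nil => exact absurd hsp (pvSplit_ne_nil t _ _ le_rfl)
          | cons a X => exact ⟨a, X, rfl⟩
        have hih := ih (z.drop (t.length - 1)) (by simp at hn ⊢; omega)
        rw [hax] at hih ⊢
        rw [PySem.Chars.join_cons_cons, hih]
        simp
      · rw [pvSplit, if_neg (by simp [hp]), pvRep, if_neg (by simp [hp])]
        obtain ⟨a, X, hax⟩ : ∃ a X, pvSplit t z = a :: X := by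
          cases hsp : pvSplit t z with
          | nil => exact absurd hsp (pvSplit_ne_nil t _ _ le_rfl)
          | cons a X => exact ⟨a, X, rfl⟩
        have hih := ih z (by simp at hn ⊢; omega)
        rw [hax] at hih ⊢
        simp only [List.modifyHead]
        cases X with
        | nil =>
          rw [PySem.Chars.join_singleton] at hih ⊢
          rw [← hih]
        | cons b Y =>
          rw [PySem.Chars.join_cons_cons] at hih ⊢
          rw [← hih]
          simp

lemma pvWrap_eq (x t color : List Char) (ht : t ≠ []) :
    pvWrapTokenInHtml x t color = pvRep t (pvSpanB t color) x := by
  simp only [pvWrapTokenInHtml]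
  rw [pvSplitOn_eq t x ht]
  exact pvJoin_split t _ ht x.length x le_rfl

-- ---------- the twelve concrete steps ----------

set_option maxRecDepth 100000 in
lemma pvStep1 (x : List Char) :
    pvWrapTokenInHtml (pvScan ([] : List (List Char × List Char)) x) "[PERSON]".toList (PySem.Dict.getD pvColors "PERSON".toList []) =
      pvScan [("[PERSON]".toList, pvSpanB "[PERSON]".toList "linear-gradient(90deg, #aa9cfc, #fc9ce7)".toList)] x := by
  rw [show PySem.Dict.getD pvColors "PERSON".toList [] = "linear-gradient(90deg, #aa9cfc, #fc9ce7)".toList from by decide]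
  rw [pvWrap_eq _ "[PERSON]".toList "linear-gradient(90deg, #aa9cfc, #fc9ce7)".toList (by decide)]
  exact pvMain "[PERSON]".toList (pvSpanB "[PERSON]".toList "linear-gradient(90deg, #aa9cfc, #fc9ce7)".toList) ([] : List (List Char × List Char)) (by decide) (by decide) x

set_option maxRecDepth 100000 in
lemma pvStep2 (x : List Char) :
    pvWrapTokenInHtml (pvScan [("[PERSON]".toList, pvSpanB "[PERSON]".toList "linear-gradient(90deg, #aa9cfc, #fc9ce7)".toList)] x) "[LOCATION]".toList (PySem.Dict.getD pvColors "LOCATION".toList []) =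
      pvScan [("[LOCATION]".toList, pvSpanB "[LOCATION]".toList "linear-gradient(90deg, #a1c4fd, #c2e9fb)".toList), ("[PERSON]".toList, pvSpanB "[PERSON]".toList "linear-gradient(90deg, #aa9cfc, #fc9ce7)".toList)] x := by
  rw [show PySem.Dict.getD pvColors "LOCATION".toList [] = "linear-gradient(90deg, #a1c4fd, #c2e9fb)".toList from by decide]
  rw [pvWrap_eq _ "[LOCATION]".toList "linear-gradient(90deg, #a1c4fd, #c2e9fb)".toList (by decide)]
  exact pvMain "[LOCATION]".toList (pvSpanB "[LOCATION]".toList "linear-gradient(90deg, #a1c4fd, #c2e9fb)".toList) [("[PERSON]".toList, pvSpanB "[PERSON]".toList "linear-gradient(90deg, #aa9cfc, #fc9ce7)".toList)] (by decide) (by decide) x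

set_option maxRecDepth 100000 in
lemma pvStep3 (x : List Char) :
    pvWrapTokenInHtml (pvScan [("[LOCATION]".toList, pvSpanB "[LOCATION]".toList "linear-gradient(90deg, #a1c4fd, #c2e9fb)".toList), ("[PERSON]".toList, pvSpanB "[PERSON]".toList "linear-gradient(90deg, #aa9cfc, #fc9ce7)".toList)] x) "[ID]".toList (PySem.Dict.getD pvColors "ID".toList []) =
      pvScan [("[ID]".toList, pvSpanB "[ID]".toList "linear-gradient(90deg, #ff9a9e, #fecfef)".toList), ("[LOCATION]".toList, pvSpanB "[LOCATION]".toList "linear-gradient(90deg, #a1c4fd, #c2e9fb)".toList), ("[PERSON]".toList, pvSpanB "[PERSON]".toList "linear-gradient(90deg, #aa9cfc, #fc9ce7)".toList)] x := by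
  rw [show PySem.Dict.getD pvColors "ID".toList [] = "linear-gradient(90deg, #ff9a9e, #fecfef)".toList from by decide]
  rw [pvWrap_eq _ "[ID]".toList "linear-gradient(90deg, #ff9a9e, #fecfef)".toList (by decide)]
  exact pvMain "[ID]".toList (pvSpanB "[ID]".toList "linear-gradient(90deg, #ff9a9e, #fecfef)".toList) [("[LOCATION]".toList, pvSpanB "[LOCATION]".toList "linear-gradient(90deg, #a1c4fd, #c2e9fb)".toList), ("[PERSON]".toList, pvSpanB "[PERSON]".toList "linear-gradient(90deg, #aa9cfc, #fc9ce7)".toList)] (by decide) (by decide) x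

set_option maxRecDepth 100000 in
lemma pvStep4 (x : List Char) :
    pvWrapTokenInHtml (pvScan [("[ID]".toList, pvSpanB "[ID]".toList "linear-gradient(90deg, #ff9a9e, #fecfef)".toList), ("[LOCATION]".toList, pvSpanB "[LOCATION]".toList "linear-gradient(90deg, #a1c4fd, #c2e9fb)".toList), ("[PERSON]".toList, pvSpanB "[PERSON]".toList "linear-gradient(90deg, #aa9cfc, #fc9ce7)".toList)] x) "[NHS_NUMBER]".toList (PySem.Dict.getD pvColors "NHS_NUMBER".toList []) =
      pvScan [("[NHS_NUMBER]".toList, pvSpanB "[NHS_NUMBER]".toList "linear-gradient(90deg, #ff9a9e, #fecfef)".toList), ("[ID]".toList, pvSpanB "[ID]".toList "linear-gradient(90deg, #ff9a9e, #fecfef)".toList), ("[LOCATION]".toList, pvSpanB "[LOCATION]".toList "linear-gradient(90deg, #a1c4fd, #c2e9fb)".toList), ("[PERSON]".toList, pvSpanB "[PERSON]".toList "linear-gradient(90deg, #aa9cfc, #fc9ce7)".toList)] x := by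
  rw [show PySem.Dict.getD pvColors "NHS_NUMBER".toList [] = "linear-gradient(90deg, #ff9a9e, #fecfef)".toList from by decide]
  rw [pvWrap_eq _ "[NHS_NUMBER]".toList "linear-gradient(90deg, #ff9a9e, #fecfef)".toList (by decide)]
  exact pvMain "[NHS_NUMBER]".toList (pvSpanB "[NHS_NUMBER]".toList "linear-gradient(90deg, #ff9a9e, #fecfef)".toList) [("[ID]".toList, pvSpanB "[ID]".toList "linear-gradient(90deg, #ff9a9e, #fecfef)".toList), ("[LOCATION]".toList, pvSpanB "[LOCATION]".toList "linear-gradient(90deg, #a1c4fd, #c2e9fb)".toList), ("[PERSON]".toList, pvSpanB "[PERSON]".toList "linear-gradient(90deg, #aa9cfc, #fc9ce7)".toList)] (by decide) (by decide) x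

set_option maxRecDepth 100000 in
lemma pvStep5 (x : List Char) :
    pvWrapTokenInHtml (pvScan [("[NHS_NUMBER]".toList, pvSpanB "[NHS_NUMBER]".toList "linear-gradient(90deg, #ff9a9e, #fecfef)".toList), ("[ID]".toList, pvSpanB "[ID]".toList "linear-gradient(90deg, #ff9a9e, #fecfef)".toList), ("[LOCATION]".toList, pvSpanB "[LOCATION]".toList "linear-gradient(90deg, #a1c4fd, #c2e9fb)".toList), ("[PERSON]".toList, pvSpanB "[PERSON]".toList "linear-gradient(90deg, #aa9cfc, #fc9ce7)".toList)] x) "[DATE_TIME]".toList (PySem.Dict.getD pvColors "DATE_TIME".toList []) =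
      pvScan [("[DATE_TIME]".toList, pvSpanB "[DATE_TIME]".toList "linear-gradient(90deg, #fddb92, #d1fdff)".toList), ("[NHS_NUMBER]".toList, pvSpanB "[NHS_NUMBER]".toList "linear-gradient(90deg, #ff9a9e, #fecfef)".toList), ("[ID]".toList, pvSpanB "[ID]".toList "linear-gradient(90deg, #ff9a9e, #fecfef)".toList), ("[LOCATION]".toList, pvSpanB "[LOCATION]".toList "linear-gradient(90deg, #a1c4fd, #c2e9fb)".toList), ("[PERSON]".toList, pvSpanB "[PERSON]".toList "linear-gradient(90deg, #aa9cfc, #fc9ce7)".toList)] x := by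
  rw [show PySem.Dict.getD pvColors "DATE_TIME".toList [] = "linear-gradient(90deg, #fddb92, #d1fdff)".toList from by decide]
  rw [pvWrap_eq _ "[DATE_TIME]".toList "linear-gradient(90deg, #fddb92, #d1fdff)".toList (by decide)]
  exact pvMain "[DATE_TIME]".toList (pvSpanB "[DATE_TIME]".toList "linear-gradient(90deg, #fddb92, #d1fdff)".toList) [("[NHS_NUMBER]".toList, pvSpanB "[NHS_NUMBER]".toList "linear-gradient(90deg, #ff9a9e, #fecfef)".toList), ("[ID]".toList, pvSpanB "[ID]".toList "linear-gradient(90deg, #ff9a9e, #fecfef)".toList), ("[LOCATION]".toList, pvSpanB "[LOCATION]".toList "linear-gradient(90deg, #a1c4fd, #c2e9fb)".toList), ("[PERSON]".toList, pvSpanB "[PERSON]".toList "linear-gradient(90deg, #aa9cfc, #fc9ce7)".toList)] (by decide) (by decide) x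

set_option maxRecDepth 100000 in
lemma pvStep6 (x : List Char) :
    pvWrapTokenInHtml (pvScan [("[DATE_TIME]".toList, pvSpanB "[DATE_TIME]".toList "linear-gradient(90deg, #fddb92, #d1fdff)".toList), ("[NHS_NUMBER]".toList, pvSpanB "[NHS_NUMBER]".toList "linear-gradient(90deg, #ff9a9e, #fecfef)".toList), ("[ID]".toList, pvSpanB "[ID]".toList "linear-gradient(90deg, #ff9a9e, #fecfef)".toList), ("[LOCATION]".toList, pvSpanB "[LOCATION]".toList "linear-gradient(90deg, #a1c4fd, #c2e9fb)".toList), ("[PERSON]".toList, pvSpanB "[PERSON]".toList "linear-gradient(90deg, #aa9cfc, #fc9ce7)".toList)] x) "[EVENT]".toList (PySem.Dict.getD pvColors "EVENT".toList []) =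
      pvScan [("[EVENT]".toList, pvSpanB "[EVENT]".toList "linear-gradient(90deg, #a6c0fe, #f68084)".toList), ("[DATE_TIME]".toList, pvSpanB "[DATE_TIME]".toList "linear-gradient(90deg, #fddb92, #d1fdff)".toList), ("[NHS_NUMBER]".toList, pvSpanB "[NHS_NUMBER]".toList "linear-gradient(90deg, #ff9a9e, #fecfef)".toList), ("[ID]".toList, pvSpanB "[ID]".toList "linear-gradient(90deg, #ff9a9e, #fecfef)".toList), ("[LOCATION]".toList, pvSpanB "[LOCATION]".toList "linear-gradient(90deg, #a1c4fd, #c2e9fb)".toList), ("[PERSON]".toList, pvSpanB "[PERSON]".toList "linear-gradient(90deg, #aa9cfc, #fc9ce7)".toList)] x := by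
  rw [show PySem.Dict.getD pvColors "EVENT".toList [] = "linear-gradient(90deg, #a6c0fe, #f68084)".toList from by decide]
  rw [pvWrap_eq _ "[EVENT]".toList "linear-gradient(90deg, #a6c0fe, #f68084)".toList (by decide)]
  exact pvMain "[EVENT]".toList (pvSpanB "[EVENT]".toList "linear-gradient(90deg, #a6c0fe, #f68084)".toList) [("[DATE_TIME]".toList, pvSpanB "[DATE_TIME]".toList "linear-gradient(90deg, #fddb92, #d1fdff)".toList), ("[NHS_NUMBER]".toList, pvSpanB "[NHS_NUMBER]".toList "linear-gradient(90deg, #ff9a9e, #fecfef)".toList), ("[ID]".toList, pvSpanB "[ID]".toList "linear-gradient(90deg, #ff9a9e, #fecfef)".toList), ("[LOCATION]".toList, pvSpanB "[LOCATION]".toList "linear-gradient(90deg, #a1c4fd, #c2e9fb)".toList), ("[PERSON]".toList, pvSpanB "[PERSON]".toList "linear-gradient(90deg, #aa9cfc, #fc9ce7)".toList)] (by decide) (by decide) x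

set_option maxRecDepth 100000 in
lemma pvStep7 (x : List Char) :
    pvWrapTokenInHtml (pvScan [("[EVENT]".toList, pvSpanB "[EVENT]".toList "linear-gradient(90deg, #a6c0fe, #f68084)".toList), ("[DATE_TIME]".toList, pvSpanB "[DATE_TIME]".toList "linear-gradient(90deg, #fddb92, #d1fdff)".toList), ("[NHS_NUMBER]".toList, pvSpanB "[NHS_NUMBER]".toList "linear-gradient(90deg, #ff9a9e, #fecfef)".toList), ("[ID]".toList, pvSpanB "[ID]".toList "linear-gradient(90deg, #ff9a9e, #fecfef)".toList), ("[LOCATION]".toList, pvSpanB "[LOCATION]".toList "linear-gradient(90deg, #a1c4fd, #c2e9fb)".toList), ("[PERSON]".toList, pvSpanB "[PERSON]".toList "linear-gradient(90deg, #aa9cfc, #fc9ce7)".toList)] x) "[POSTCODE]".toList (PySem.Dict.getD pvColors "POSTCODE".toList []) =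
      pvScan [("[POSTCODE]".toList, pvSpanB "[POSTCODE]".toList "linear-gradient(90deg, #c2e59c, #64b3f4)".toList), ("[EVENT]".toList, pvSpanB "[EVENT]".toList "linear-gradient(90deg, #a6c0fe, #f68084)".toList), ("[DATE_TIME]".toList, pvSpanB "[DATE_TIME]".toList "linear-gradient(90deg, #fddb92, #d1fdff)".toList), ("[NHS_NUMBER]".toList, pvSpanB "[NHS_NUMBER]".toList "linear-gradient(90deg, #ff9a9e, #fecfef)".toList), ("[ID]".toList, pvSpanB "[ID]".toList "linear-gradient(90deg, #ff9a9e, #fecfef)".toList), ("[LOCATION]".toList, pvSpanB "[LOCATION]".toList "linear-gradient(90deg, #a1c4fd, #c2e9fb)".toList), ("[PERSON]".toList, pvSpanB "[PERSON]".toList "linear-gradient(90deg, #aa9cfc, #fc9ce7)".toList)] x := by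
  rw [show PySem.Dict.getD pvColors "POSTCODE".toList [] = "linear-gradient(90deg, #c2e59c, #64b3f4)".toList from by decide]
  rw [pvWrap_eq _ "[POSTCODE]".toList "linear-gradient(90deg, #c2e59c, #64b3f4)".toList (by decide)]
  exact pvMain "[POSTCODE]".toList (pvSpanB "[POSTCODE]".toList "linear-gradient(90deg, #c2e59c, #64b3f4)".toList) [("[EVENT]".toList, pvSpanB "[EVENT]".toList "linear-gradient(90deg, #a6c0fe, #f68084)".toList), ("[DATE_TIME]".toList, pvSpanB "[DATE_TIME]".toList "linear-gradient(90deg, #fddb92, #d1fdff)".toList), ("[NHS_NUMBER]".toList, pvSpanB "[NHS_NUMBER]".toList "linear-gradient(90deg, #ff9a9e, #fecfef)".toList), ("[ID]".toList, pvSpanB "[ID]".toList "linear-gradient(90deg, #ff9a9e, #fecfef)".toList), ("[LOCATION]".toList, pvSpanB "[LOCATION]".toList "linear-gradient(90deg, #a1c4fd, #c2e9fb)".toList), ("[PERSON]".toList, pvSpanB "[PERSON]".toList "linear-gradient(90deg, #aa9cfc, #fc9ce7)".toList)] (by decide) (by decide) x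

set_option maxRecDepth 100000 in
lemma pvStep8 (x : List Char) :
    pvWrapTokenInHtml (pvScan [("[POSTCODE]".toList, pvSpanB "[POSTCODE]".toList "linear-gradient(90deg, #c2e59c, #64b3f4)".toList), ("[EVENT]".toList, pvSpanB "[EVENT]".toList "linear-gradient(90deg, #a6c0fe, #f68084)".toList), ("[DATE_TIME]".toList, pvSpanB "[DATE_TIME]".toList "linear-gradient(90deg, #fddb92, #d1fdff)".toList), ("[NHS_NUMBER]".toList, pvSpanB "[NHS_NUMBER]".toList "linear-gradient(90deg, #ff9a9e, #fecfef)".toList), ("[ID]".toList, pvSpanB "[ID]".toList "linear-gradient(90deg, #ff9a9e, #fecfef)".toList), ("[LOCATION]".toList, pvSpanB "[LOCATION]".toList "linear-gradient(90deg, #a1c4fd, #c2e9fb)".toList), ("[PERSON]".toList, pvSpanB "[PERSON]".toList "linear-gradient(90deg, #aa9cfc, #fc9ce7)".toList)] x) "[USERNAME]".toList (PySem.Dict.getD pvColors "USERNAME".toList []) =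
      pvScan [("[USERNAME]".toList, pvSpanB "[USERNAME]".toList "linear-gradient(90deg, #aa9cfc, #fc9ce7)".toList), ("[POSTCODE]".toList, pvSpanB "[POSTCODE]".toList "linear-gradient(90deg, #c2e59c, #64b3f4)".toList), ("[EVENT]".toList, pvSpanB "[EVENT]".toList "linear-gradient(90deg, #a6c0fe, #f68084)".toList), ("[DATE_TIME]".toList, pvSpanB "[DATE_TIME]".toList "linear-gradient(90deg, #fddb92, #d1fdff)".toList), ("[NHS_NUMBER]".toList, pvSpanB "[NHS_NUMBER]".toList "linear-gradient(90deg, #ff9a9e, #fecfef)".toList), ("[ID]".toList, pvSpanB "[ID]".toList "linear-gradient(90deg, #ff9a9e, #fecfef)".toList), ("[LOCATION]".toList, pvSpanB "[LOCATION]".toList "linear-gradient(90deg, #a1c4fd, #c2e9fb)".toList), ("[PERSON]".toList, pvSpanB "[PERSON]".toList "linear-gradient(90deg, #aa9cfc, #fc9ce7)".toList)] x := by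
  rw [show PySem.Dict.getD pvColors "USERNAME".toList [] = "linear-gradient(90deg, #aa9cfc, #fc9ce7)".toList from by decide]
  rw [pvWrap_eq _ "[USERNAME]".toList "linear-gradient(90deg, #aa9cfc, #fc9ce7)".toList (by decide)]
  exact pvMain "[USERNAME]".toList (pvSpanB "[USERNAME]".toList "linear-gradient(90deg, #aa9cfc, #fc9ce7)".toList) [("[POSTCODE]".toList, pvSpanB "[POSTCODE]".toList "linear-gradient(90deg, #c2e59c, #64b3f4)".toList), ("[EVENT]".toList, pvSpanB "[EVENT]".toList "linear-gradient(90deg, #a6c0fe, #f68084)".toList), ("[DATE_TIME]".toList, pvSpanB "[DATE_TIME]".toList "linear-gradient(90deg, #fddb92, #d1fdff)".toList), ("[NHS_NUMBER]".toList, pvSpanB "[NHS_NUMBER]".toList "linear-gradient(90deg, #ff9a9e, #fecfef)".toList), ("[ID]".toList, pvSpanB "[ID]".toList "linear-gradient(90deg, #ff9a9e, #fecfef)".toList), ("[LOCATION]".toList, pvSpanB "[LOCATION]".toList "linear-gradient(90deg, #a1c4fd, #c2e9fb)".toList), ("[PERSON]".toList, pvSpanB "[PERSON]".toList "linear-gradient(90deg,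 #aa9cfc, #fc9ce7)".toList)] (by decide) (by decide) x

set_option maxRecDepth 100000 in
lemma pvStep9 (x : List Char) :
    pvWrapTokenInHtml (pvScan [("[USERNAME]".toList, pvSpanB "[USERNAME]".toList "linear-gradient(90deg, #aa9cfc, #fc9ce7)".toList), ("[POSTCODE]".toList, pvSpanB "[POSTCODE]".toList "linear-gradient(90deg, #c2e59c, #64b3f4)".toList), ("[EVENT]".toList, pvSpanB "[EVENT]".toList "linear-gradient(90deg, #a6c0fe, #f68084)".toList), ("[DATE_TIME]".toList, pvSpanB "[DATE_TIME]".toList "linear-gradient(90deg, #fddb92, #d1fdff)".toList), ("[NHS_NUMBER]".toList, pvSpanB "[NHS_NUMBER]".toList "linear-gradient(90deg, #ff9a9e, #fecfef)".toList), ("[ID]".toList, pvSpanB "[ID]".toList "linear-gradient(90deg, #ff9a9e, #fecfef)".toList), ("[LOCATION]".toList, pvSpanB "[LOCATION]".toList "linear-gradient(90deg, #a1c4fd, #c2e9fb)".toList), ("[PERSON]".toList, pvSpanB "[PERSON]".toList "linear-gradient(90deg, #aa9cfc, #fc9ce7)".toList)] x) "[FALSE_NEGATIVE]".toList (PySem.Dict.getD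 pvColors "FALSE_NEGATIVE".toList []) =
      pvScan [("[FALSE_NEGATIVE]".toList, pvSpanB "[FALSE_NEGATIVE]".toList "linear-gradient(90deg, #ff6b6b, #ff9a9e)".toList), ("[USERNAME]".toList, pvSpanB "[USERNAME]".toList "linear-gradient(90deg, #aa9cfc, #fc9ce7)".toList), ("[POSTCODE]".toList, pvSpanB "[POSTCODE]".toList "linear-gradient(90deg, #c2e59c, #64b3f4)".toList), ("[EVENT]".toList, pvSpanB "[EVENT]".toList "linear-gradient(90deg, #a6c0fe, #f68084)".toList), ("[DATE_TIME]".toList, pvSpanB "[DATE_TIME]".toList "linear-gradient(90deg, #fddb92, #d1fdff)".toList), ("[NHS_NUMBER]".toList, pvSpanB "[NHS_NUMBER]".toList "linear-gradient(90deg, #ff9a9e, #fecfef)".toList), ("[ID]".toList, pvSpanB "[ID]".toList "linear-gradient(90deg, #ff9a9e, #fecfef)".toList), ("[LOCATION]".toList, pvSpanB "[LOCATION]".toList "linear-gradient(90deg, #a1c4fd, #c2e9fb)".toList), ("[PERSON]".toList, pvSpanB "[PERSON]".toList "linear-gradient(90deg, #aa9cfc, #fc9ce7)".toList)] x := by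
  rw [show PySem.Dict.getD pvColors "FALSE_NEGATIVE".toList [] = "linear-gradient(90deg, #ff6b6b, #ff9a9e)".toList from by decide]
  rw [pvWrap_eq _ "[FALSE_NEGATIVE]".toList "linear-gradient(90deg, #ff6b6b, #ff9a9e)".toList (by decide)]
  exact pvMain "[FALSE_NEGATIVE]".toList (pvSpanB "[FALSE_NEGATIVE]".toList "linear-gradient(90deg, #ff6b6b, #ff9a9e)".toList) [("[USERNAME]".toList, pvSpanB "[USERNAME]".toList "linear-gradient(90deg, #aa9cfc, #fc9ce7)".toList), ("[POSTCODE]".toList, pvSpanB "[POSTCODE]".toList "linear-gradient(90deg, #c2e59c, #64b3f4)".toList), ("[EVENT]".toList, pvSpanB "[EVENT]".toList "linear-gradient(90deg, #a6c0fe, #f68084)".toList), ("[DATE_TIME]".toList, pvSpanB "[DATE_TIME]".toList "linear-gradient(90deg, #fddb92, #d1fdff)".toList), ("[NHS_NUMBER]".toList, pvSpanB "[NHS_NUMBER]".toList "linear-gradient(90deg, #ff9a9e, #fecfef)".toList), ("[ID]".toList, pvSpanB "[ID]".toList "linear-gradient(90deg, #ff9a9e, #fecfef)".toList), ("[LOCATION]".toList,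 pvSpanB "[LOCATION]".toList "linear-gradient(90deg, #a1c4fd, #c2e9fb)".toList), ("[PERSON]".toList, pvSpanB "[PERSON]".toList "linear-gradient(90deg, #aa9cfc, #fc9ce7)".toList)] (by decide) (by decide) x

set_option maxRecDepth 100000 in
lemma pvStep10 (x : List Char) :
    pvWrapTokenInHtml (pvScan [("[FALSE_NEGATIVE]".toList, pvSpanB "[FALSE_NEGATIVE]".toList "linear-gradient(90deg, #ff6b6b, #ff9a9e)".toList), ("[USERNAME]".toList, pvSpanB "[USERNAME]".toList "linear-gradient(90deg, #aa9cfc, #fc9ce7)".toList), ("[POSTCODE]".toList, pvSpanB "[POSTCODE]".toList "linear-gradient(90deg, #c2e59c, #64b3f4)".toList), ("[EVENT]".toList, pvSpanB "[EVENT]".toList "linear-gradient(90deg, #a6c0fe, #f68084)".toList), ("[DATE_TIME]".toList, pvSpanB "[DATE_TIME]".toList "linear-gradient(90deg, #fddb92, #d1fdff)".toList), ("[NHS_NUMBER]".toList, pvSpanB "[NHS_NUMBER]".toList "linear-gradient(90deg, #ff9a9e, #fecfef)".toList), ("[ID]".toList, pvSpanB "[ID]".toList "linear-gradient(90deg, #ff9a9e,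 #fecfef)".toList), ("[LOCATION]".toList, pvSpanB "[LOCATION]".toList "linear-gradient(90deg, #a1c4fd, #c2e9fb)".toList), ("[PERSON]".toList, pvSpanB "[PERSON]".toList "linear-gradient(90deg, #aa9cfc, #fc9ce7)".toList)] x) "[/FALSE_NEGATIVE]".toList (PySem.Dict.getD pvColors "/FALSE_NEGATIVE".toList []) =
      pvScan [("[/FALSE_NEGATIVE]".toList, pvSpanB "[/FALSE_NEGATIVE]".toList "linear-gradient(90deg, #ff6b6b, #ff9a9e)".toList), ("[FALSE_NEGATIVE]".toList, pvSpanB "[FALSE_NEGATIVE]".toList "linear-gradient(90deg, #ff6b6b, #ff9a9e)".toList), ("[USERNAME]".toList, pvSpanB "[USERNAME]".toList "linear-gradient(90deg, #aa9cfc, #fc9ce7)".toList), ("[POSTCODE]".toList, pvSpanB "[POSTCODE]".toList "linear-gradient(90deg, #c2e59c, #64b3f4)".toList), ("[EVENT]".toList, pvSpanB "[EVENT]".toList "linear-gradient(90deg, #a6c0fe, #f68084)".toList), ("[DATE_TIME]".toList, pvSpanB "[DATE_TIME]".toList "linear-gradient(90deg, #fddb92, #d1fdff)".toList), ("[NHS_NUMBER]".toList,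 pvSpanB "[NHS_NUMBER]".toList "linear-gradient(90deg, #ff9a9e, #fecfef)".toList), ("[ID]".toList, pvSpanB "[ID]".toList "linear-gradient(90deg, #ff9a9e, #fecfef)".toList), ("[LOCATION]".toList, pvSpanB "[LOCATION]".toList "linear-gradient(90deg, #a1c4fd, #c2e9fb)".toList), ("[PERSON]".toList, pvSpanB "[PERSON]".toList "linear-gradient(90deg, #aa9cfc, #fc9ce7)".toList)] x := by
  rw [show PySem.Dict.getD pvColors "/FALSE_NEGATIVE".toList [] = "linear-gradient(90deg, #ff6b6b, #ff9a9e)".toList from by decide]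
  rw [pvWrap_eq _ "[/FALSE_NEGATIVE]".toList "linear-gradient(90deg, #ff6b6b, #ff9a9e)".toList (by decide)]
  exact pvMain "[/FALSE_NEGATIVE]".toList (pvSpanB "[/FALSE_NEGATIVE]".toList "linear-gradient(90deg, #ff6b6b, #ff9a9e)".toList) [("[FALSE_NEGATIVE]".toList, pvSpanB "[FALSE_NEGATIVE]".toList "linear-gradient(90deg, #ff6b6b, #ff9a9e)".toList), ("[USERNAME]".toList, pvSpanB "[USERNAME]".toList "linear-gradient(90deg, #aa9cfc, #fc9ce7)".toList), ("[POSTCODE]".toList, pvSpanB "[POSTCODE]".toList "linear-gradient(90deg, #c2e59c, #64b3f4)".toList), ("[EVENT]".toList, pvSpanB "[EVENT]".toList "linear-gradient(90deg, #a6c0fe, #f68084)".toList), ("[DATE_TIME]".toList, pvSpanB "[DATE_TIME]".toList "linear-gradient(90deg, #fddb92, #d1fdff)".toList), ("[NHS_NUMBER]".toList, pvSpanB "[NHS_NUMBER]".toList "linear-gradient(90deg, #ff9a9e, #fecfef)".toList), ("[ID]".toList, pvSpanB "[ID]".toList "linear-gradient(90deg, #ff9a9e, #fecfef)".toList), ("[LOCATION]".toList,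 pvSpanB "[LOCATION]".toList "linear-gradient(90deg, #a1c4fd, #c2e9fb)".toList), ("[PERSON]".toList, pvSpanB "[PERSON]".toList "linear-gradient(90deg, #aa9cfc, #fc9ce7)".toList)] (by decide) (by decide) x

set_option maxRecDepth 100000 in
lemma pvStep11 (x : List Char) :
    pvWrapTokenInHtml (pvScan [("[/FALSE_NEGATIVE]".toList, pvSpanB "[/FALSE_NEGATIVE]".toList "linear-gradient(90deg, #ff6b6b, #ff9a9e)".toList), ("[FALSE_NEGATIVE]".toList, pvSpanB "[FALSE_NEGATIVE]".toList "linear-gradient(90deg, #ff6b6b, #ff9a9e)".toList), ("[USERNAME]".toList, pvSpanB "[USERNAME]".toList "linear-gradient(90deg, #aa9cfc, #fc9ce7)".toList), ("[POSTCODE]".toList, pvSpanB "[POSTCODE]".toList "linear-gradient(90deg, #c2e59c, #64b3f4)".toList), ("[EVENT]".toList, pvSpanB "[EVENT]".toList "linear-gradient(90deg, #a6c0fe, #f68084)".toList), ("[DATE_TIME]".toList, pvSpanB "[DATE_TIME]".toList "linear-gradient(90deg, #fddb92, #d1fdff)".toList), ("[NHS_NUMBER]".toList, pvSpanB "[NHS_NUMBER]".toList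 "linear-gradient(90deg, #ff9a9e, #fecfef)".toList), ("[ID]".toList, pvSpanB "[ID]".toList "linear-gradient(90deg, #ff9a9e, #fecfef)".toList), ("[LOCATION]".toList, pvSpanB "[LOCATION]".toList "linear-gradient(90deg, #a1c4fd, #c2e9fb)".toList), ("[PERSON]".toList, pvSpanB "[PERSON]".toList "linear-gradient(90deg, #aa9cfc, #fc9ce7)".toList)] x) "[FALSE_POSITIVE]".toList (PySem.Dict.getD pvColors "FALSE_POSITIVE".toList []) =
      pvScan [("[FALSE_POSITIVE]".toList, pvSpanB "[FALSE_POSITIVE]".toList "linear-gradient(90deg, #ffcccb, #ff6666)".toList), ("[/FALSE_NEGATIVE]".toList, pvSpanB "[/FALSE_NEGATIVE]".toList "linear-gradient(90deg, #ff6b6b, #ff9a9e)".toList), ("[FALSE_NEGATIVE]".toList, pvSpanB "[FALSE_NEGATIVE]".toList "linear-gradient(90deg, #ff6b6b, #ff9a9e)".toList), ("[USERNAME]".toList, pvSpanB "[USERNAME]".toList "linear-gradient(90deg, #aa9cfc, #fc9ce7)".toList), ("[POSTCODE]".toList, pvSpanB "[POSTCODE]".toList "linear-gradient(90deg, #c2e59c,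 #64b3f4)".toList), ("[EVENT]".toList, pvSpanB "[EVENT]".toList "linear-gradient(90deg, #a6c0fe, #f68084)".toList), ("[DATE_TIME]".toList, pvSpanB "[DATE_TIME]".toList "linear-gradient(90deg, #fddb92, #d1fdff)".toList), ("[NHS_NUMBER]".toList, pvSpanB "[NHS_NUMBER]".toList "linear-gradient(90deg, #ff9a9e, #fecfef)".toList), ("[ID]".toList, pvSpanB "[ID]".toList "linear-gradient(90deg, #ff9a9e, #fecfef)".toList), ("[LOCATION]".toList, pvSpanB "[LOCATION]".toList "linear-gradient(90deg, #a1c4fd, #c2e9fb)".toList), ("[PERSON]".toList, pvSpanB "[PERSON]".toList "linear-gradient(90deg, #aa9cfc, #fc9ce7)".toList)] x := by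
  rw [show PySem.Dict.getD pvColors "FALSE_POSITIVE".toList [] = "linear-gradient(90deg, #ffcccb, #ff6666)".toList from by decide]
  rw [pvWrap_eq _ "[FALSE_POSITIVE]".toList "linear-gradient(90deg, #ffcccb, #ff6666)".toList (by decide)]
  exact pvMain "[FALSE_POSITIVE]".toList (pvSpanB "[FALSE_POSITIVE]".toList "linear-gradient(90deg, #ffcccb, #ff6666)".toList) [("[/FALSE_NEGATIVE]".toList, pvSpanB "[/FALSE_NEGATIVE]".toList "linear-gradient(90deg, #ff6b6b, #ff9a9e)".toList), ("[FALSE_NEGATIVE]".toList, pvSpanB "[FALSE_NEGATIVE]".toList "linear-gradient(90deg, #ff6b6b, #ff9a9e)".toList), ("[USERNAME]".toList, pvSpanB "[USERNAME]".toList "linear-gradient(90deg, #aa9cfc, #fc9ce7)".toList), ("[POSTCODE]".toList, pvSpanB "[POSTCODE]".toList "linear-gradient(90deg, #c2e59c, #64b3f4)".toList), ("[EVENT]".toList, pvSpanB "[EVENT]".toList "linear-gradient(90deg, #a6c0fe, #f68084)".toList), ("[DATE_TIME]".toList, pvSpanB "[DATE_TIME]".toList "linear-gradient(90deg, #fddb92,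 #d1fdff)".toList), ("[NHS_NUMBER]".toList, pvSpanB "[NHS_NUMBER]".toList "linear-gradient(90deg, #ff9a9e, #fecfef)".toList), ("[ID]".toList, pvSpanB "[ID]".toList "linear-gradient(90deg, #ff9a9e, #fecfef)".toList), ("[LOCATION]".toList, pvSpanB "[LOCATION]".toList "linear-gradient(90deg, #a1c4fd, #c2e9fb)".toList), ("[PERSON]".toList, pvSpanB "[PERSON]".toList "linear-gradient(90deg, #aa9cfc, #fc9ce7)".toList)] (by decide) (by decide) x

set_option maxRecDepth 100000 in
lemma pvStep12 (x : List Char) :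
    pvWrapTokenInHtml (pvScan [("[FALSE_POSITIVE]".toList, pvSpanB "[FALSE_POSITIVE]".toList "linear-gradient(90deg, #ffcccb, #ff6666)".toList), ("[/FALSE_NEGATIVE]".toList, pvSpanB "[/FALSE_NEGATIVE]".toList "linear-gradient(90deg, #ff6b6b, #ff9a9e)".toList), ("[FALSE_NEGATIVE]".toList, pvSpanB "[FALSE_NEGATIVE]".toList "linear-gradient(90deg, #ff6b6b, #ff9a9e)".toList), ("[USERNAME]".toList, pvSpanB "[USERNAME]".toList "linear-gradient(90deg, #aa9cfc, #fc9ce7)".toList), ("[POSTCODE]".toList, pvSpanB "[POSTCODE]".toList "linear-gradient(90deg, #c2e59c, #64b3f4)".toList), ("[EVENT]".toList, pvSpanB "[EVENT]".toList "linear-gradient(90deg, #a6c0fe, #f68084)".toList), ("[DATE_TIME]".toList, pvSpanB "[DATE_TIME]".toList "linear-gradient(90deg, #fddb92, #d1fdff)".toList), ("[NHS_NUMBER]".toList, pvSpanB "[NHS_NUMBER]".toList "linear-gradient(90deg, #ff9a9e, #fecfef)".toList), ("[ID]".toList, pvSpanB "[ID]".toList "linear-gradient(90deg, #ff9a9e,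 #fecfef)".toList), ("[LOCATION]".toList, pvSpanB "[LOCATION]".toList "linear-gradient(90deg, #a1c4fd, #c2e9fb)".toList), ("[PERSON]".toList, pvSpanB "[PERSON]".toList "linear-gradient(90deg, #aa9cfc, #fc9ce7)".toList)] x) "[/FALSE_POSITIVE]".toList (PySem.Dict.getD pvColors "/FALSE_POSITIVE".toList []) =
      pvScan [("[/FALSE_POSITIVE]".toList, pvSpanB "[/FALSE_POSITIVE]".toList "linear-gradient(90deg, #ffcccb, #ff6666)".toList), ("[FALSE_POSITIVE]".toList, pvSpanB "[FALSE_POSITIVE]".toList "linear-gradient(90deg, #ffcccb, #ff6666)".toList), ("[/FALSE_NEGATIVE]".toList, pvSpanB "[/FALSE_NEGATIVE]".toList "linear-gradient(90deg, #ff6b6b, #ff9a9e)".toList), ("[FALSE_NEGATIVE]".toList, pvSpanB "[FALSE_NEGATIVE]".toList "linear-gradient(90deg, #ff6b6b, #ff9a9e)".toList), ("[USERNAME]".toList, pvSpanB "[USERNAME]".toList "linear-gradient(90deg, #aa9cfc, #fc9ce7)".toList), ("[POSTCODE]".toList, pvSpanB "[POSTCODE]".toList "linear-gradient(90deg, #c2e59c,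 #64b3f4)".toList), ("[EVENT]".toList, pvSpanB "[EVENT]".toList "linear-gradient(90deg, #a6c0fe, #f68084)".toList), ("[DATE_TIME]".toList, pvSpanB "[DATE_TIME]".toList "linear-gradient(90deg, #fddb92, #d1fdff)".toList), ("[NHS_NUMBER]".toList, pvSpanB "[NHS_NUMBER]".toList "linear-gradient(90deg, #ff9a9e, #fecfef)".toList), ("[ID]".toList, pvSpanB "[ID]".toList "linear-gradient(90deg, #ff9a9e, #fecfef)".toList), ("[LOCATION]".toList, pvSpanB "[LOCATION]".toList "linear-gradient(90deg, #a1c4fd, #c2e9fb)".toList), ("[PERSON]".toList, pvSpanB "[PERSON]".toList "linear-gradient(90deg, #aa9cfc, #fc9ce7)".toList)] x := by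
  rw [show PySem.Dict.getD pvColors "/FALSE_POSITIVE".toList [] = "linear-gradient(90deg, #ffcccb, #ff6666)".toList from by decide]
  rw [pvWrap_eq _ "[/FALSE_POSITIVE]".toList "linear-gradient(90deg, #ffcccb, #ff6666)".toList (by decide)]
  exact pvMain "[/FALSE_POSITIVE]".toList (pvSpanB "[/FALSE_POSITIVE]".toList "linear-gradient(90deg, #ffcccb, #ff6666)".toList) [("[FALSE_POSITIVE]".toList, pvSpanB "[FALSE_POSITIVE]".toList "linear-gradient(90deg, #ffcccb, #ff6666)".toList), ("[/FALSE_NEGATIVE]".toList, pvSpanB "[/FALSE_NEGATIVE]".toList "linear-gradient(90deg, #ff6b6b, #ff9a9e)".toList), ("[FALSE_NEGATIVE]".toList, pvSpanB "[FALSE_NEGATIVE]".toList "linear-gradient(90deg, #ff6b6b, #ff9a9e)".toList), ("[USERNAME]".toList, pvSpanB "[USERNAME]".toList "linear-gradient(90deg, #aa9cfc, #fc9ce7)".toList), ("[POSTCODE]".toList, pvSpanB "[POSTCODE]".toList "linear-gradient(90deg, #c2e59c, #64b3f4)".toList), ("[EVENT]".toList, pvSpanB "[EVENT]".toList "linear-gradient(90deg,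 #a6c0fe, #f68084)".toList), ("[DATE_TIME]".toList, pvSpanB "[DATE_TIME]".toList "linear-gradient(90deg, #fddb92, #d1fdff)".toList), ("[NHS_NUMBER]".toList, pvSpanB "[NHS_NUMBER]".toList "linear-gradient(90deg, #ff9a9e, #fecfef)".toList), ("[ID]".toList, pvSpanB "[ID]".toList "linear-gradient(90deg, #ff9a9e, #fecfef)".toList), ("[LOCATION]".toList, pvSpanB "[LOCATION]".toList "linear-gradient(90deg, #a1c4fd, #c2e9fb)".toList), ("[PERSON]".toList, pvSpanB "[PERSON]".toList "linear-gradient(90deg, #aa9cfc, #fc9ce7)".toList)] (by decide) (by decide) x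

-- ---------- assembly ----------

lemma pvBody_eq (cs : List Char) :
    pvTokenColors.foldl (fun acc p => pvWrapTokenInHtml acc p.1 (PySem.Dict.getD pvColors p.2 [])) cs
      = pvScan pvSpans cs := by
  simp only [pvTokenColors, List.foldl]
  conv_lhs => rw [← pvScan_table_nil cs]
  rw [pvStep1 cs, pvStep2 cs, pvStep3 cs, pvStep4 cs, pvStep5 cs, pvStep6 cs,
      pvStep7 cs, pvStep8 cs, pvStep9 cs, pvStep10 cs, pvStep11 cs, pvStep12 cs]
  rfl

-- ===== VERDICT (by name: the statement is the Claim_ definition above) =====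
theorem visualize_entities_spec : Claim_equal_visualize_entities := by
  intro s _
  show visualize_entities s = visualize_entities_alt s
  rw [visualize_entities, visualize_entities_alt]
  simp only [pvBody_eq]
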